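-- pv_equiv track=rewrite | github.com/yizhoucc/med_dict | analyze_attribution.py | _is_skip_value
-- ===== SOURCE A (Python) =====
-- _SKIP_EXACT = {
--     '', 'none', 'n/a', '[]', '{}',
-- }
--
-- _SKIP_CONTAINS = (
--     'the note does not',
--     'not provided in the note',
--     'not specified in',
--     'not mentioned in',
--     'not discussed during',
--     'not documented',
--     'cannot be determined',
--     'unable to determine',
--     'no data available',
-- )
--
-- def _is_skip_value(value_str):
--     val = value_str.strip()
--     if len(val) == 0:
--         return True
--     val_lower = val.lower().rstrip('.').rstrip()
--     if val_lower in _SKIP_EXACT: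
--         return True
--     for phrase in _SKIP_CONTAINS:
--         if phrase in val_lower:
--             return True
--     return False
-- ===== SOURCE B (Python) =====
-- _SKIP_EXACT = {
--     '', 'none', 'n/a', '[]', '{}',
-- }
--
-- _SKIP_CONTAINS = (
--     'the note does not',
--     'not provided in the note',
--     'not specified in',
--     'not mentioned in',
--     'not discussed during',
--     'not documented',
--     'cannot be determined',
--     'unable to determine',
--     'no data available',
-- )
--
-- # Multi-pattern matcher: bucket the phrases by first character once at module
-- # load, then make one pass over the string, comparing at each position only
-- # the phrases that can possibly start there.
-- _PHRASES_BY_FIRST = {}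
-- for _p in _SKIP_CONTAINS:
--     _PHRASES_BY_FIRST.setdefault(_p[0], []).append(_p)
--
--
-- def _is_skip_value(value_str):
--     norm = value_str.strip().lower().rstrip('.').rstrip()
--     if norm in _SKIP_EXACT:
--         return True
--     for i, ch in enumerate(norm):
--         for p in _PHRASES_BY_FIRST.get(ch, ()):
--             if norm.startswith(p, i):
--                 return True
--     return False
-- ===== Notes on version B (the rewrite author's own statement) =====
-- stated objective: alternative
-- what changed: B builds a first-character index of the skip phrases once at module load and then scans the normalized string in a single left-to-right pass, at each position comparing only the phrases whose first character matches there, instead of running one full substring search per phrase; the empty-string early return is folded into the exact-set membership test, whose set already contains the empty string.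
import Mathlib
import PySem

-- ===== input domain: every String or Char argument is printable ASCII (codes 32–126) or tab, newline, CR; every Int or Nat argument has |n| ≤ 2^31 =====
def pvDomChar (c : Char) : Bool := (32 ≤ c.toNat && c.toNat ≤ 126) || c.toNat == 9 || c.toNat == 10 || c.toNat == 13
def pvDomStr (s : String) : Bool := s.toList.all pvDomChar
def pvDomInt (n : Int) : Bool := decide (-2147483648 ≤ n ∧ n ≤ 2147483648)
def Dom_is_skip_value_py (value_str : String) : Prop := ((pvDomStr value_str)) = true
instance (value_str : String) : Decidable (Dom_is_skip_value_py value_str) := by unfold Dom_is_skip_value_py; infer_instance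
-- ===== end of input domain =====

-- B indexes the skip phrases by first character once and scans the string in a single
-- pass, testing at each position only the phrases that can start there; objective:
-- alternative (same worst-case cost).

-- ===== PORT A =====
def pvSkipExact : List String := ["", "none", "n/a", "[]", "{}"]
def pvSkipContains : List String :=
  ["the note does not", "not provided in the note", "not specified in",
   "not mentioned in", "not discussed during", "not documented",
   "cannot be determined", "unable to determine", "no data available"]

-- Python's s.rstrip('.') — exact: drops trailing '.' characters
def pvRstripDot (s : String) : String :=
  String.ofList ((s.toList.reverse.dropWhile (fun c => c == '.')).reverse)

def is_skip_value_py (value_str : String) : Bool :=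
  let val := PySem.Str.strip value_str
  if PySem.Str.len val == 0 then true
  else
    let val_lower := PySem.Str.rstrip (pvRstripDot (PySem.Str.lower val))
    if pvSkipExact.contains val_lower then true
    else pvSkipContains.any (fun phrase => PySem.Str.isIn phrase val_lower)

-- ===== PORT B =====
-- p[0] of a phrase (every phrase in _SKIP_CONTAINS is a nonempty literal)
def pvHead (p : String) : Char := p.toList.headD ' '

-- _PHRASES_BY_FIRST: the module-load loop 'setdefault(_p[0], []).append(_p)'
-- is exactly Dict.modify with default [] and append
def pvPhrasesByFirst : PySem.Dict Char (List String) :=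
  pvSkipContains.foldl (fun d p => d.modify (pvHead p) [] (· ++ [p])) PySem.Dict.empty

-- Python's norm.startswith(p, i) for 0 ≤ i: p is a prefix of norm[i:]
def is_skip_value_py_alt (value_str : String) : Bool :=
  let norm := PySem.Str.rstrip (pvRstripDot (PySem.Str.lower (PySem.Str.strip value_str)))
  if pvSkipExact.contains norm then true
  else
    (PySem.List.enumerate norm.toList 0).any (fun ic =>
      (pvPhrasesByFirst.getD ic.2 []).any (fun p =>
        PySem.Chars.startswith (norm.toList.drop ic.1.toNat) p.toList))

-- ===== PRECONDITION & SPEC =====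
def Spec_is_skip_value_py (value_str : String) (out : Bool) : Prop := out = is_skip_value_py_alt value_str
instance (value_str : String) (out : Bool) : Decidable (Spec_is_skip_value_py value_str out) := by unfold Spec_is_skip_value_py; infer_instance

-- ===== CLAIM (what is proved, stated in full; the proofs are below) =====
def Claim_equal_is_skip_value_py : Prop := ∀ (value_str : String), Dom_is_skip_value_py value_str → Spec_is_skip_value_py value_str (is_skip_value_py value_str)

-- ===== LEMMAS AND PROOFS =====

-- a nonempty pattern is an infix iff it is a prefix at some position strictly inside the list
theorem pv_infix_iff_prefix_at (p l : List Char) (hp : p ≠ []) :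
    p <:+: l ↔ ∃ n : Nat, n < l.length ∧ p.isPrefixOf (l.drop n) := by
  constructor
  · rintro ⟨pre, suf, rfl⟩
    refine ⟨pre.length, ?_, ?_⟩
    · have hp' : 0 < p.length := by
        cases p with
        | nil => exact absurd rfl hp
        | cons a t => simp
      simp only [List.length_append]
      omega
    · simp [List.isPrefixOf_iff_prefix]
  · rintro ⟨n, _, hpre⟩
    rw [List.isPrefixOf_iff_prefix] at hpre
    exact hpre.isInfix.trans (List.drop_suffix n l).isInfix

-- the first-character buckets hold exactly the phrases starting with that character
theorem pv_bucket_mem (ch : Char) (p : String) :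
    p ∈ pvPhrasesByFirst.getD ch [] ↔ p ∈ pvSkipContains ∧ pvHead p = ch := by
  have h : pvPhrasesByFirst =
      (pvSkipContains.map (fun p => (pvHead p, p))).foldl
        (fun d q => d.modify q.1 [] (· ++ [q.2])) PySem.Dict.empty := by
    rw [List.foldl_map]
    rfl
  rw [h, PySem.Dict.getD_foldl_modify_append]
  simp [List.filter_map, List.mem_filter, Function.comp, and_comm]

-- A's per-phrase loop equals B's indexed position scan
theorem pv_scan_eq (s : List Char)
    (hne : ∀ p ∈ pvSkipContains, p.toList ≠ []) :
    pvSkipContains.any (fun phrase => PySem.Chars.isIn phrase.toList s) =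
      (PySem.List.enumerate s 0).any (fun ic =>
        (pvPhrasesByFirst.getD ic.2 []).any (fun p =>
          PySem.Chars.startswith (s.drop ic.1.toNat) p.toList)) := by
  rw [Bool.eq_iff_iff]
  simp only [List.any_eq_true, PySem.List.mem_enumerate_iff, PySem.Chars.isIn_iff_infix,
    PySem.Chars.startswith_iff, pv_bucket_mem]
  constructor
  · rintro ⟨p, hp, hinf⟩
    obtain ⟨n, hn, hpre⟩ := (pv_infix_iff_prefix_at _ _ (hne p hp)).1 hinf
    rw [List.isPrefixOf_iff_prefix] at hpre
    obtain ⟨c, t, hc⟩ := List.exists_cons_of_ne_nil (hne p hp)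
    have hhead : pvHead p = s[n] := by
      have h1 : (s.drop n).head? = some c := by
        rcases hpre with ⟨rest, hr⟩
        rw [← hr, hc]; simp
      rw [List.head?_drop, List.getElem?_eq_getElem hn] at h1
      injection h1 with h1
      simp [pvHead, hc, h1]
    exact ⟨((0 : Int) + (n : Int), s[n]), ⟨n, hn, rfl⟩, p, ⟨hp, hhead⟩, by simpa using hpre⟩
  · rintro ⟨ic, ⟨k, hk, rfl⟩, q, ⟨hq, -⟩, hpre⟩
    exact ⟨q, hq, (pv_infix_iff_prefix_at _ _ (hne q hq)).2
      ⟨k, hk, by rw [List.isPrefixOf_iff_prefix]; simpa using hpre⟩⟩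

-- ===== VERDICT (by name: the statement is the Claim_ definition above) =====
theorem is_skip_value_py_spec : Claim_equal_is_skip_value_py := by
  intro value_str _
  unfold Spec_is_skip_value_py
  simp only [is_skip_value_py, is_skip_value_py_alt]
  by_cases h : PySem.Str.len (PySem.Str.strip value_str) == 0
  · have hval : PySem.Str.strip value_str = "" := by
      simp [PySem.Str.len] at h
      simp [PySem.Str.strip, h]
    rw [if_pos h, hval]
    decide
  · rw [if_neg h]
    by_cases hex : pvSkipExact.contains
        (PySem.Str.rstrip (pvRstripDot (PySem.Str.lower (PySem.Str.strip value_str)))) = true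
    · rw [if_pos hex, if_pos hex]
    · rw [if_neg hex, if_neg hex]
      have := pv_scan_eq (PySem.Str.rstrip (pvRstripDot (PySem.Str.lower (PySem.Str.strip value_str)))).toList (by decide)
      simpa using this
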